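-- pv_equiv track=rewrite | github.com/AlyonaCIA/Astar-Island-Oracle | astar_baseline.py | compute_tile_grid
-- ===== SOURCE A (Python) =====
-- def compute_tile_grid(width, height, max_tile=15):
--     """
--     Non-overlapping tile partition covering the entire map.
--     For a 40x40 map: 9 tiles (3x3) at x=[0,15,30], y=[0,15,30].
--     Returns list of (x, y, w, h) tuples.
--     """
--     x_specs = []
--     x = 0
--     while x < width:
--         w = min(max_tile, width - x)
--         x_specs.append((x, w))
--         x += w
--     y_specs = []
--     y = 0
--     while y < height:
--         h = min(max_tile, height - y)
--         y_specs.append((y, h))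
--         y += h
--     return [(tx, ty, tw, th) for (ty, th) in y_specs for (tx, tw) in x_specs]
-- ===== SOURCE B (Python) =====
-- def compute_tile_grid(width, height, max_tile=15):
--     """Non-overlapping tile partition covering the entire map.
--     Direct nested stride loops; clipped sizes computed inline per tile."""
--     tiles = []
--     for ty in range(0, height, max_tile):
--         th = min(max_tile, height - ty)
--         for tx in range(0, width, max_tile):
--             tw = min(max_tile, width - tx)
--             tiles.append((tx, ty, tw, th))
--     return tiles
-- ===== Notes on version B (the rewrite author's own statement) =====
-- stated objective: simpler
-- what changed: Drops the precomputed x_specs/y_specs tables and their product comprehension; B is a direct double stride loop over range(0, height, max_tile) and range(0, width, max_tile) that recomputes each clipped tile size inline.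
-- outside the precondition, e.g. on compute_tile_grid(0, 0, 0): A returns [], B raises ValueError; on compute_tile_grid(-1, -1, -1): A returns [], B returns [(0, 0, -1, -1)]
import Mathlib
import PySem

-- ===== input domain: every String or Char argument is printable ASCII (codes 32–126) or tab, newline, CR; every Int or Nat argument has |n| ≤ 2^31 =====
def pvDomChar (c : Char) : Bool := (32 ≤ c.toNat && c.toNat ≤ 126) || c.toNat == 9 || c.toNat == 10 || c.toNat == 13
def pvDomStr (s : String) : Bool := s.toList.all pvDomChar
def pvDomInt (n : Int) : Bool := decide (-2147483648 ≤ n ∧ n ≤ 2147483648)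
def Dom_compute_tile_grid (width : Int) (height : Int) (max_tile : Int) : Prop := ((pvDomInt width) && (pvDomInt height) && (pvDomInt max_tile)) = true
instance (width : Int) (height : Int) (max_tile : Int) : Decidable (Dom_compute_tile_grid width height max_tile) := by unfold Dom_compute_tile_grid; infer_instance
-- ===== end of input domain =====

-- B replaces A's two precomputed spec tables + product comprehension by a direct
-- nested stride loop computing clipped tile sizes inline (objective: simpler).

-- ===== PORT A =====
-- A's while loop 'x = 0; while x < bound: w = min(mt, bound-x); specs.append((x,w)); x += w',
-- written with a fuel counter only to make it total; when 0 < mt the loop runs at most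
-- bound.toNat times, so fuel bound.toNat + 1 never runs out on inputs in Pre_.
def pvSpecLoop (bound mt : Int) : Nat → Int → List (Int × Int) → List (Int × Int)
  | 0, _, acc => acc
  | fuel + 1, x, acc =>
    if x < bound then
      let w := min mt (bound - x)
      pvSpecLoop bound mt fuel (x + w) (acc ++ [(x, w)])
    else acc

def compute_tile_grid (width : Int) (height : Int) (max_tile : Int) : List (Int × Int × Int × Int) :=
  let x_specs := pvSpecLoop width max_tile (width.toNat + 1) 0 []
  let y_specs := pvSpecLoop height max_tile (height.toNat + 1) 0 []
  y_specs.flatMap (fun yh => x_specs.map (fun xw => (xw.1, yh.1, xw.2, yh.2)))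

-- ===== PORT B =====
def compute_tile_grid_alt (width : Int) (height : Int) (max_tile : Int) : List (Int × Int × Int × Int) :=
  (PySem.List.pyRange 0 height max_tile).foldl (fun tiles ty =>
    let th := min max_tile (height - ty)
    (PySem.List.pyRange 0 width max_tile).foldl (fun tiles tx =>
      let tw := min max_tile (width - tx)
      tiles ++ [(tx, ty, tw, th)]) tiles) []

-- ===== PRECONDITION & SPEC =====
-- Pre_ excludes non-positive max_tile: there A's while loops diverge whenever a dimension
-- is positive, and otherwise A returns [] only because the loop guards happen to fail,
-- while B's range(0, _, max_tile) raises ValueError (step 0) or counts downward (step < 0).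
def Pre_compute_tile_grid (width : Int) (height : Int) (max_tile : Int) : Prop := 0 < max_tile
instance (width : Int) (height : Int) (max_tile : Int) : Decidable (Pre_compute_tile_grid width height max_tile) := by unfold Pre_compute_tile_grid; infer_instance
def pvWitness_compute_tile_grid : Int × Int × Int := (7, 5, 3)

def Spec_compute_tile_grid (width : Int) (height : Int) (max_tile : Int) (out : List (Int × Int × Int × Int)) : Prop := out = compute_tile_grid_alt width height max_tile
instance (width : Int) (height : Int) (max_tile : Int) (out : List (Int × Int × Int × Int)) : Decidable (Spec_compute_tile_grid width height max_tile out) := by unfold Spec_compute_tile_grid; infer_instance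

-- ===== CLAIM (what is proved, stated in full; the proofs are below) =====
def Claim_equal_compute_tile_grid : Prop := ∀ (width : Int) (height : Int) (max_tile : Int), Dom_compute_tile_grid width height max_tile → Pre_compute_tile_grid width height max_tile → Spec_compute_tile_grid width height max_tile (compute_tile_grid width height max_tile)

-- ===== LEMMAS AND PROOFS =====

-- range with positive step is empty when the interval is empty
lemma pyRange_pos_nil {a b s : Int} (hs : 0 < s) (h : b ≤ a) :
    PySem.List.pyRange a b s = [] := by
  rw [PySem.List.pyRange_of_pos a b hs]
  simp [show ¬ a < b by omega]

-- range with positive step peels its first element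
lemma pyRange_pos_cons {a b s : Int} (hs : 0 < s) (h : a < b) :
    PySem.List.pyRange a b s = a :: PySem.List.pyRange (a + s) b s := by
  rw [PySem.List.pyRange_of_pos a b hs, PySem.List.pyRange_of_pos (a + s) b hs]
  have hM : (if a + s < b then ((b - (a + s) + s - 1) / s).toNat else 0)
      = ((b - a - 1) / s).toNat := by
    by_cases hc : a + s < b
    · simp only [hc, if_true]
      congr 1
      ring_nf
    · simp only [hc, if_false]
      have h0 : 0 ≤ b - a - 1 := by omega
      have h1 : b - a - 1 < s := by omega
      rw [Int.ediv_eq_zero_of_lt h0 h1]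
      rfl
  have hN : ((b - a + s - 1) / s) = (b - a - 1) / s + 1 := by
    have := Int.add_mul_ediv_right (b - a - 1) 1 (by omega : s ≠ 0)
    calc (b - a + s - 1) / s = (b - a - 1 + 1 * s) / s := by ring_nf
    _ = (b - a - 1) / s + 1 := this
  have hq : 0 ≤ (b - a - 1) / s := Int.ediv_nonneg (by omega) (by omega)
  rw [hM]
  simp only [show a < b from h, if_true, hN]
  have : ((b - a - 1) / s + 1).toNat = ((b - a - 1) / s).toNat + 1 := by omega
  rw [this, List.range_succ_eq_map, List.map_cons, List.map_map]
  congr 1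
  · simp
  · apply List.map_congr_left
    intro k _
    simp [Function.comp]
    ring

-- A's spec-building loop computes the stride positions with their clipped widths
lemma pvSpecLoop_eq (bound mt : Int) (hmt : 0 < mt) :
    ∀ (fuel : Nat) (x : Int) (acc : List (Int × Int)), (bound - x).toNat ≤ fuel →
      pvSpecLoop bound mt fuel x acc
        = acc ++ (PySem.List.pyRange x bound mt).map (fun t => (t, min mt (bound - t))) := by
  intro fuel
  induction fuel with
  | zero =>
    intro x acc hf
    have : bound ≤ x := by omega
    simp [pvSpecLoop, pyRange_pos_nil hmt this]
  | succ n ih =>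
    intro x acc hf
    by_cases hx : x < bound
    · simp only [pvSpecLoop, hx, if_true]
      set w := min mt (bound - x) with hw
      have hw1 : 1 ≤ w := by omega
      rw [ih (x + w) _ (by omega)]
      rw [pyRange_pos_cons hmt hx]
      by_cases hcase : bound - x ≤ mt
      · have hweq : w = bound - x := by omega
        have : bound ≤ x + w := by omega
        rw [pyRange_pos_nil hmt this, pyRange_pos_nil hmt (by omega : bound ≤ x + mt)]
        simp
        omega
      · have hweq : w = mt := by omega
        rw [hweq]
        simp
        omega
    · simp [pvSpecLoop, hx, pyRange_pos_nil hmt (by omega : bound ≤ x)]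

-- ===== VERDICT (by name: the statement is the Claim_ definition above) =====
theorem compute_tile_grid_spec : Claim_equal_compute_tile_grid := by
  intro width height max_tile _ hpre
  unfold Spec_compute_tile_grid compute_tile_grid compute_tile_grid_alt
  have hx := pvSpecLoop_eq width max_tile hpre (width.toNat + 1) 0 [] (by omega)
  have hy := pvSpecLoop_eq height max_tile hpre (height.toNat + 1) 0 [] (by omega)
  simp only [hx, hy, List.nil_append]
  simp only [PySem.List.foldl_append_singleton_eq_map, PySem.List.foldl_append_eq_flatMap]
  simp [List.flatMap_map, Function.comp_def]
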